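-- pv_equiv track=rewrite | github.com/zhanghuobiao/031702534 | shisanshui_END.py | santiao
-- ===== SOURCE A (Python) =====
-- def santiao(mypai):
--     "三条"
--     santiao = []
--     santiaoA = []
--     santiao2 = []
--     santiao3 = []
--     santiao4 = []
--     santiao5 = []
--     santiao6 = []
--     santiao7 = []
--     santiao8 = []
--     santiao9 = []
--     santiao10 = []
--     santiaoJ = []
--     santiaoQ = []
--     santiaoK = []
--     for i in range(len(mypai)):
--         if mypai[i][1] == 'A':
--             santiaoA.append(mypai[i])
--         elif mypai[i][1] == '2':
--             santiao2.append(mypai[i])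
--         elif mypai[i][1] == '3':
--             santiao3.append(mypai[i])
--         elif mypai[i][1] == '4':
--             santiao4.append(mypai[i])
--         elif mypai[i][1] == '5':
--             santiao5.append(mypai[i])
--         elif mypai[i][1] == '6':
--             santiao6.append(mypai[i])
--         elif mypai[i][1] == '7':
--             santiao7.append(mypai[i])
--         elif mypai[i][1] == '8':
--             santiao8.append(mypai[i])
--         elif mypai[i][1] == '9':
--             santiao9.append(mypai[i])
--         elif mypai[i][1] == '1':
--             santiao10.append(mypai[i])
--         elif mypai[i][1] == 'J':
--             santiaoJ.append(mypai[i])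
--         elif mypai[i][1] == 'Q':
--             santiaoQ.append(mypai[i])
--         else:
--             santiaoK.append(mypai[i])
--     if len(santiaoA) == 3:
--         santiao.append(santiaoA)
--     if len(santiaoK) == 3:
--         santiao.append(santiaoK)
--     if len(santiaoQ)== 3:
--         santiao.append(santiaoQ)
--     if len(santiaoJ) == 3:
--         santiao.append(santiaoJ)
--     if len(santiao10) == 3:
--         santiao.append(santiao10)
--     if len(santiao9)== 3:
--         santiao.append(santiao9)
--     if len(santiao8) == 3:
--         santiao.append(santiao8)
--     if len(santiao7) == 3:
--         santiao.append(santiao7)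
--     if len(santiao6) == 3:
--         santiao.append(santiao6)
--     if len(santiao5) == 3:
--         santiao.append(santiao5)
--     if len(santiao4) == 3:
--         santiao.append(santiao4)
--     if len(santiao3) == 3:
--         santiao.append(santiao3)
--     if len(santiao2) == 3:
--         santiao.append(santiao2)
--     return santiao
-- ===== SOURCE B (Python) =====
-- RANKV = {'2': 2, '3': 3, '4': 4, '5': 5, '6': 6, '7': 7, '8': 8, '9': 9,
--          '1': 10, 'J': 11, 'Q': 12, 'A': 14}
--
--
-- def santiao(mypai):
--     "三条"
--     # sort-then-scan: stable-sort the hand by descending rank value (unknown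
--     # rank chars count as K = 13), then cut the sorted list into maximal runs
--     # of equal rank and keep exactly the runs of length 3.
--     cards = sorted(mypai, key=lambda c: RANKV.get(c[1], 13), reverse=True)
--     out = []
--     i = 0
--     n = len(cards)
--     while i < n:
--         j = i
--         r = RANKV.get(cards[i][1], 13)
--         while j < n and RANKV.get(cards[j][1], 13) == r:
--             j += 1
--         if j - i == 3:
--             out.append(cards[i:j])
--         i = j
--     return out
-- ===== Notes on version B (the rewrite author's own statement) =====
-- stated objective: alternative
-- what changed: Replaces A's one-pass bucketing into 13 named lists and two 13-branch if/elif chains by a sort-then-scan algorithm: stable-sort the hand by descending rank value, then cut the sorted list into maximal runs of equal rank and keep the runs of length exactly 3.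
import Mathlib
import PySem

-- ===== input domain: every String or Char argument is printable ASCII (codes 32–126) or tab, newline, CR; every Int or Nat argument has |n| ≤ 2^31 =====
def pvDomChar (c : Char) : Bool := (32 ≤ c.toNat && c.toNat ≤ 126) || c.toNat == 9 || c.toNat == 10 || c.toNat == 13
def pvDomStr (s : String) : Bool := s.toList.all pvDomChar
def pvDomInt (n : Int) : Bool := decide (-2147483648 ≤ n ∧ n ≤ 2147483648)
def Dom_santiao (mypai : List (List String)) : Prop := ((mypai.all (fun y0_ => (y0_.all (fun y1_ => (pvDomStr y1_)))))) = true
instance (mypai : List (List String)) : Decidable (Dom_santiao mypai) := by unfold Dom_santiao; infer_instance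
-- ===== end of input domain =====

-- B replaces A's one-pass bucketing into 13 named lists by a different algorithm:
-- stable-sort the hand by descending rank value, then scan the sorted list once,
-- cutting it into maximal runs of equal rank and keeping the runs of length 3.
-- Both programs raise IndexError on a card with fewer than 2 entries; Pre_ excludes those.

-- ===== PORT A =====
structure SBuckets where
  bA : List (List String)
  b2 : List (List String)
  b3 : List (List String)
  b4 : List (List String)
  b5 : List (List String)
  b6 : List (List String)
  b7 : List (List String)
  b8 : List (List String)
  b9 : List (List String)
  b10 : List (List String)
  bJ : List (List String)
  bQ : List (List String)
  bK : List (List String)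
deriving Repr, DecidableEq

-- one iteration of A's for-loop (mypai[i][1] via pyGet?; the else-branch is the K bucket)
def santiaoStep (b : SBuckets) (card : List String) : SBuckets :=
  if PySem.List.pyGet? card 1 = some "A" then { b with bA := b.bA ++ [card] }
  else if PySem.List.pyGet? card 1 = some "2" then { b with b2 := b.b2 ++ [card] }
  else if PySem.List.pyGet? card 1 = some "3" then { b with b3 := b.b3 ++ [card] }
  else if PySem.List.pyGet? card 1 = some "4" then { b with b4 := b.b4 ++ [card] }
  else if PySem.List.pyGet? card 1 = some "5" then { b with b5 := b.b5 ++ [card] }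
  else if PySem.List.pyGet? card 1 = some "6" then { b with b6 := b.b6 ++ [card] }
  else if PySem.List.pyGet? card 1 = some "7" then { b with b7 := b.b7 ++ [card] }
  else if PySem.List.pyGet? card 1 = some "8" then { b with b8 := b.b8 ++ [card] }
  else if PySem.List.pyGet? card 1 = some "9" then { b with b9 := b.b9 ++ [card] }
  else if PySem.List.pyGet? card 1 = some "1" then { b with b10 := b.b10 ++ [card] }
  else if PySem.List.pyGet? card 1 = some "J" then { b with bJ := b.bJ ++ [card] }
  else if PySem.List.pyGet? card 1 = some "Q" then { b with bQ := b.bQ ++ [card] }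
  else { b with bK := b.bK ++ [card] }

-- 'if len(bucket) == 3: santiao.append(bucket)' rendered by appIf
def appIf (cond : Prop) [Decidable cond] (s : List (List (List String))) (x : List (List String)) :
    List (List (List String)) :=
  if cond then s ++ [x] else s

def santiao (mypai : List (List String)) : List (List (List String)) :=
  let b := mypai.foldl santiaoStep ⟨[], [], [], [], [], [], [], [], [], [], [], [], []⟩
  let s : List (List (List String)) := []
  let s := appIf (b.bA.length = 3) s b.bA
  let s := appIf (b.bK.length = 3) s b.bK
  let s := appIf (b.bQ.length = 3) s b.bQ
  let s := appIf (b.bJ.length = 3) s b.bJ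
  let s := appIf (b.b10.length = 3) s b.b10
  let s := appIf (b.b9.length = 3) s b.b9
  let s := appIf (b.b8.length = 3) s b.b8
  let s := appIf (b.b7.length = 3) s b.b7
  let s := appIf (b.b6.length = 3) s b.b6
  let s := appIf (b.b5.length = 3) s b.b5
  let s := appIf (b.b4.length = 3) s b.b4
  let s := appIf (b.b3.length = 3) s b.b3
  let s := appIf (b.b2.length = 3) s b.b2
  s

-- ===== PORT B =====
-- the RANKV dict of Source B
def pvRankMap : PySem.Dict String Int :=
  PySem.Dict.ofList [("2", 2), ("3", 3), ("4", 4), ("5", 5), ("6", 6), ("7", 7),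
    ("8", 8), ("9", 9), ("1", 10), ("J", 11), ("Q", 12), ("A", 14)]

-- RANKV.get(c[1], 13); c[1] totalized with .getD "" — Pre_ excludes the none (IndexError) case
def rankB (card : List String) : Int :=
  pvRankMap.getD ((PySem.List.pyGet? card 1).getD "") 13

-- the inner 'while j < n and rank(cards[j]) == r: j += 1' of Source B: split off the
-- maximal leading run of rank r, returning (run, remainder)
def runSplit (r : Int) : List (List String) → List (List String) × List (List String)
  | [] => ([], [])
  | c :: t =>
    if rankB c == r then
      let p := runSplit r t
      (c :: p.1, p.2)
    else ([], c :: t)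

theorem runSplit_snd_length (r : Int) (t : List (List String)) :
    (runSplit r t).2.length ≤ t.length := by
  induction t with
  | nil => simp [runSplit]
  | cons c t ih =>
    unfold runSplit
    by_cases h : (rankB c == r) = true
    · simp [h]
      omega
    · simp [h]

-- the outer while-loop of Source B: emit each maximal run whose length is exactly 3
def scanRuns : List (List String) → List (List (List String))
  | [] => []
  | c :: t =>
    let p := runSplit (rankB c) t
    (if p.1.length + 1 = 3 then [c :: p.1] else []) ++ scanRuns p.2
termination_by l => l.length
decreasing_by
  have := runSplit_snd_length (rankB c) t
  simp only [List.length_cons]; omega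

def santiao_alt (mypai : List (List String)) : List (List (List String)) :=
  scanRuns (PySem.List.sorted mypai rankB true)

-- ===== PRECONDITION & SPEC =====
-- Pre_ excludes cards with fewer than 2 entries: there mypai[i][1] raises IndexError in both programs.
def Pre_santiao (mypai : List (List String)) : Prop := ∀ card ∈ mypai, 2 ≤ card.length
instance (mypai : List (List String)) : Decidable (Pre_santiao mypai) := by unfold Pre_santiao; infer_instance

def pvWitness_santiao : List (List String) := [["H", "A"], ["S", "A"], ["D", "A"], ["H", "7"]]

def Spec_santiao (mypai : List (List String)) (out : List (List (List String))) : Prop := out = santiao_alt mypai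
instance (mypai : List (List String)) (out : List (List (List String))) : Decidable (Spec_santiao mypai out) := by unfold Spec_santiao; infer_instance

-- ===== CLAIM (what is proved, stated in full; the proofs are below) =====
def Claim_equal_santiao : Prop := ∀ (mypai : List (List String)), Dom_santiao mypai → Pre_santiao mypai → Spec_santiao mypai (santiao mypai)

-- ===== LEMMAS AND PROOFS =====

-- the cards of rank r, in hand order
def rfilter (l : List (List String)) (r : Int) : List (List String) :=
  l.filter (fun c => rankB c == r)

def ranksDesc : List Int := [14, 13, 12, 11, 10, 9, 8, 7, 6, 5, 4, 3, 2]

theorem rfilter_cons (c : List String) (t : List (List String)) (r : Int) :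
    rfilter (c :: t) r = if rankB c = r then c :: rfilter t r else rfilter t r := by
  simp [rfilter, List.filter_cons]

theorem rfilter_append_singleton (l : List (List String)) (c : List String) (r : Int) :
    rfilter (l ++ [c]) r = rfilter l r ++ if rankB c = r then [c] else [] := by
  simp [rfilter, List.filter_append, List.filter_cons]

theorem mem_rfilter {x : List String} {l : List (List String)} {r : Int}
    (h : x ∈ rfilter l r) : rankB x = r := by
  have := List.of_mem_filter h
  simpa using this

theorem pvRankMap_mk : pvRankMap = PySem.Dict.mk [("2", 2), ("3", 3), ("4", 4), ("5", 5),
    ("6", 6), ("7", 7), ("8", 8), ("9", 9), ("1", 10), ("J", 11), ("Q", 12), ("A", 14)] := by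
  decide

theorem getD_mk_not_mem (L : List (String × Int)) (s : String) (d : Int)
    (h : ∀ p ∈ L, p.1 ≠ s) : (PySem.Dict.mk L).getD s d = d := by
  induction L with
  | nil => rfl
  | cons p t ih =>
    rw [PySem.Dict.getD_eq_get?_getD, PySem.Dict.get?_mk_cons]
    have hp : (p.1 == s) = false := beq_eq_false_iff_ne.mpr (h p (List.mem_cons_self))
    rw [hp]
    simp only [Bool.false_eq_true, if_false]
    rw [← PySem.Dict.getD_eq_get?_getD]
    exact ih (fun q hq => h q (List.mem_cons_of_mem p hq))

theorem rank_A (c : List String) (h : PySem.List.pyGet? c 1 = some "A") : rankB c = 14 := by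
  unfold rankB; rw [h]; decide

theorem rank_2 (c : List String) (h : PySem.List.pyGet? c 1 = some "2") : rankB c = 2 := by
  unfold rankB; rw [h]; decide

theorem rank_3 (c : List String) (h : PySem.List.pyGet? c 1 = some "3") : rankB c = 3 := by
  unfold rankB; rw [h]; decide

theorem rank_4 (c : List String) (h : PySem.List.pyGet? c 1 = some "4") : rankB c = 4 := by
  unfold rankB; rw [h]; decide

theorem rank_5 (c : List String) (h : PySem.List.pyGet? c 1 = some "5") : rankB c = 5 := by
  unfold rankB; rw [h]; decide

theorem rank_6 (c : List String) (h : PySem.List.pyGet? c 1 = some "6") : rankB c = 6 := by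
  unfold rankB; rw [h]; decide

theorem rank_7 (c : List String) (h : PySem.List.pyGet? c 1 = some "7") : rankB c = 7 := by
  unfold rankB; rw [h]; decide

theorem rank_8 (c : List String) (h : PySem.List.pyGet? c 1 = some "8") : rankB c = 8 := by
  unfold rankB; rw [h]; decide

theorem rank_9 (c : List String) (h : PySem.List.pyGet? c 1 = some "9") : rankB c = 9 := by
  unfold rankB; rw [h]; decide

theorem rank_10 (c : List String) (h : PySem.List.pyGet? c 1 = some "1") : rankB c = 10 := by
  unfold rankB; rw [h]; decide

theorem rank_J (c : List String) (h : PySem.List.pyGet? c 1 = some "J") : rankB c = 11 := by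
  unfold rankB; rw [h]; decide

theorem rank_Q (c : List String) (h : PySem.List.pyGet? c 1 = some "Q") : rankB c = 12 := by
  unfold rankB; rw [h]; decide

theorem rank_K (c : List String) (h1 : ¬ PySem.List.pyGet? c 1 = some "A") (h2 : ¬ PySem.List.pyGet? c 1 = some "2") (h3 : ¬ PySem.List.pyGet? c 1 = some "3") (h4 : ¬ PySem.List.pyGet? c 1 = some "4") (h5 : ¬ PySem.List.pyGet? c 1 = some "5") (h6 : ¬ PySem.List.pyGet? c 1 = some "6") (h7 : ¬ PySem.List.pyGet? c 1 = some "7") (h8 : ¬ PySem.List.pyGet? c 1 = some "8") (h9 : ¬ PySem.List.pyGet? c 1 = some "9") (h10 : ¬ PySem.List.pyGet? c 1 = some "1") (h11 : ¬ PySem.List.pyGet? c 1 = some "J") (h12 : ¬ PySem.List.pyGet? c 1 = some "Q") :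
    rankB c = 13 := by
  unfold rankB
  cases e : PySem.List.pyGet? c 1 with
  | none => decide
  | some s =>
    rw [Option.getD_some, pvRankMap_mk]
    refine getD_mk_not_mem _ _ _ ?_
    intro p hp
    simp only [List.mem_cons, List.not_mem_nil, or_false] at hp
    rw [e] at h1 h2 h3 h4 h5 h6 h7 h8 h9 h10 h11 h12
    rcases hp with rfl | rfl | rfl | rfl | rfl | rfl | rfl | rfl | rfl | rfl | rfl | rfl <;>
      (intro e; subst e; simp_all)

theorem rankB_mem_ranksDesc (c : List String) : rankB c ∈ ranksDesc := by
  by_cases h1 : PySem.List.pyGet? c 1 = some "A"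
  · rw [rank_A c h1]; decide
  by_cases h2 : PySem.List.pyGet? c 1 = some "2"
  · rw [rank_2 c h2]; decide
  by_cases h3 : PySem.List.pyGet? c 1 = some "3"
  · rw [rank_3 c h3]; decide
  by_cases h4 : PySem.List.pyGet? c 1 = some "4"
  · rw [rank_4 c h4]; decide
  by_cases h5 : PySem.List.pyGet? c 1 = some "5"
  · rw [rank_5 c h5]; decide
  by_cases h6 : PySem.List.pyGet? c 1 = some "6"
  · rw [rank_6 c h6]; decide
  by_cases h7 : PySem.List.pyGet? c 1 = some "7"
  · rw [rank_7 c h7]; decide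
  by_cases h8 : PySem.List.pyGet? c 1 = some "8"
  · rw [rank_8 c h8]; decide
  by_cases h9 : PySem.List.pyGet? c 1 = some "9"
  · rw [rank_9 c h9]; decide
  by_cases h10 : PySem.List.pyGet? c 1 = some "1"
  · rw [rank_10 c h10]; decide
  by_cases h11 : PySem.List.pyGet? c 1 = some "J"
  · rw [rank_J c h11]; decide
  by_cases h12 : PySem.List.pyGet? c 1 = some "Q"
  · rw [rank_Q c h12]; decide
  rw [rank_K c h1 h2 h3 h4 h5 h6 h7 h8 h9 h10 h11 h12]; decide

-- ===== A side: the 13 buckets are the rank filters =====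

theorem step_A (b : SBuckets) (c : List String) (h : PySem.List.pyGet? c 1 = some "A") :
    santiaoStep b c = { b with bA := b.bA ++ [c] } := by
  unfold santiaoStep; rw [if_pos h]

theorem step_2 (b : SBuckets) (c : List String) (h1 : ¬ PySem.List.pyGet? c 1 = some "A") (h : PySem.List.pyGet? c 1 = some "2") :
    santiaoStep b c = { b with b2 := b.b2 ++ [c] } := by
  unfold santiaoStep; rw [if_neg h1, if_pos h]

theorem step_3 (b : SBuckets) (c : List String) (h1 : ¬ PySem.List.pyGet? c 1 = some "A") (h2 : ¬ PySem.List.pyGet? c 1 = some "2") (h : PySem.List.pyGet? c 1 = some "3") :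
    santiaoStep b c = { b with b3 := b.b3 ++ [c] } := by
  unfold santiaoStep; rw [if_neg h1, if_neg h2, if_pos h]

theorem step_4 (b : SBuckets) (c : List String) (h1 : ¬ PySem.List.pyGet? c 1 = some "A") (h2 : ¬ PySem.List.pyGet? c 1 = some "2") (h3 : ¬ PySem.List.pyGet? c 1 = some "3") (h : PySem.List.pyGet? c 1 = some "4") :
    santiaoStep b c = { b with b4 := b.b4 ++ [c] } := by
  unfold santiaoStep; rw [if_neg h1, if_neg h2, if_neg h3, if_pos h]

theorem step_5 (b : SBuckets) (c : List String) (h1 : ¬ PySem.List.pyGet? c 1 = some "A") (h2 : ¬ PySem.List.pyGet? c 1 = some "2") (h3 : ¬ PySem.List.pyGet? c 1 = some "3") (h4 : ¬ PySem.List.pyGet? c 1 = some "4") (h : PySem.List.pyGet? c 1 = some "5") :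
    santiaoStep b c = { b with b5 := b.b5 ++ [c] } := by
  unfold santiaoStep; rw [if_neg h1, if_neg h2, if_neg h3, if_neg h4, if_pos h]

theorem step_6 (b : SBuckets) (c : List String) (h1 : ¬ PySem.List.pyGet? c 1 = some "A") (h2 : ¬ PySem.List.pyGet? c 1 = some "2") (h3 : ¬ PySem.List.pyGet? c 1 = some "3") (h4 : ¬ PySem.List.pyGet? c 1 = some "4") (h5 : ¬ PySem.List.pyGet? c 1 = some "5") (h : PySem.List.pyGet? c 1 = some "6") :
    santiaoStep b c = { b with b6 := b.b6 ++ [c] } := by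
  unfold santiaoStep; rw [if_neg h1, if_neg h2, if_neg h3, if_neg h4, if_neg h5, if_pos h]

theorem step_7 (b : SBuckets) (c : List String) (h1 : ¬ PySem.List.pyGet? c 1 = some "A") (h2 : ¬ PySem.List.pyGet? c 1 = some "2") (h3 : ¬ PySem.List.pyGet? c 1 = some "3") (h4 : ¬ PySem.List.pyGet? c 1 = some "4") (h5 : ¬ PySem.List.pyGet? c 1 = some "5") (h6 : ¬ PySem.List.pyGet? c 1 = some "6") (h : PySem.List.pyGet? c 1 = some "7") :
    santiaoStep b c = { b with b7 := b.b7 ++ [c] } := by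
  unfold santiaoStep; rw [if_neg h1, if_neg h2, if_neg h3, if_neg h4, if_neg h5, if_neg h6, if_pos h]

theorem step_8 (b : SBuckets) (c : List String) (h1 : ¬ PySem.List.pyGet? c 1 = some "A") (h2 : ¬ PySem.List.pyGet? c 1 = some "2") (h3 : ¬ PySem.List.pyGet? c 1 = some "3") (h4 : ¬ PySem.List.pyGet? c 1 = some "4") (h5 : ¬ PySem.List.pyGet? c 1 = some "5") (h6 : ¬ PySem.List.pyGet? c 1 = some "6") (h7 : ¬ PySem.List.pyGet? c 1 = some "7") (h : PySem.List.pyGet? c 1 = some "8") :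
    santiaoStep b c = { b with b8 := b.b8 ++ [c] } := by
  unfold santiaoStep; rw [if_neg h1, if_neg h2, if_neg h3, if_neg h4, if_neg h5, if_neg h6, if_neg h7, if_pos h]

theorem step_9 (b : SBuckets) (c : List String) (h1 : ¬ PySem.List.pyGet? c 1 = some "A") (h2 : ¬ PySem.List.pyGet? c 1 = some "2") (h3 : ¬ PySem.List.pyGet? c 1 = some "3") (h4 : ¬ PySem.List.pyGet? c 1 = some "4") (h5 : ¬ PySem.List.pyGet? c 1 = some "5") (h6 : ¬ PySem.List.pyGet? c 1 = some "6") (h7 : ¬ PySem.List.pyGet? c 1 = some "7") (h8 : ¬ PySem.List.pyGet? c 1 = some "8") (h : PySem.List.pyGet? c 1 = some "9") :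
    santiaoStep b c = { b with b9 := b.b9 ++ [c] } := by
  unfold santiaoStep; rw [if_neg h1, if_neg h2, if_neg h3, if_neg h4, if_neg h5, if_neg h6, if_neg h7, if_neg h8, if_pos h]

theorem step_10 (b : SBuckets) (c : List String) (h1 : ¬ PySem.List.pyGet? c 1 = some "A") (h2 : ¬ PySem.List.pyGet? c 1 = some "2") (h3 : ¬ PySem.List.pyGet? c 1 = some "3") (h4 : ¬ PySem.List.pyGet? c 1 = some "4") (h5 : ¬ PySem.List.pyGet? c 1 = some "5") (h6 : ¬ PySem.List.pyGet? c 1 = some "6") (h7 : ¬ PySem.List.pyGet? c 1 = some "7") (h8 : ¬ PySem.List.pyGet? c 1 = some "8") (h9 : ¬ PySem.List.pyGet? c 1 = some "9") (h : PySem.List.pyGet? c 1 = some "1") :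
    santiaoStep b c = { b with b10 := b.b10 ++ [c] } := by
  unfold santiaoStep; rw [if_neg h1, if_neg h2, if_neg h3, if_neg h4, if_neg h5, if_neg h6, if_neg h7, if_neg h8, if_neg h9, if_pos h]

theorem step_J (b : SBuckets) (c : List String) (h1 : ¬ PySem.List.pyGet? c 1 = some "A") (h2 : ¬ PySem.List.pyGet? c 1 = some "2") (h3 : ¬ PySem.List.pyGet? c 1 = some "3") (h4 : ¬ PySem.List.pyGet? c 1 = some "4") (h5 : ¬ PySem.List.pyGet? c 1 = some "5") (h6 : ¬ PySem.List.pyGet? c 1 = some "6") (h7 : ¬ PySem.List.pyGet? c 1 = some "7") (h8 : ¬ PySem.List.pyGet? c 1 = some "8") (h9 : ¬ PySem.List.pyGet? c 1 = some "9") (h10 : ¬ PySem.List.pyGet? c 1 = some "1") (h : PySem.List.pyGet? c 1 = some "J") :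
    santiaoStep b c = { b with bJ := b.bJ ++ [c] } := by
  unfold santiaoStep; rw [if_neg h1, if_neg h2, if_neg h3, if_neg h4, if_neg h5, if_neg h6, if_neg h7, if_neg h8, if_neg h9, if_neg h10, if_pos h]

theorem step_Q (b : SBuckets) (c : List String) (h1 : ¬ PySem.List.pyGet? c 1 = some "A") (h2 : ¬ PySem.List.pyGet? c 1 = some "2") (h3 : ¬ PySem.List.pyGet? c 1 = some "3") (h4 : ¬ PySem.List.pyGet? c 1 = some "4") (h5 : ¬ PySem.List.pyGet? c 1 = some "5") (h6 : ¬ PySem.List.pyGet? c 1 = some "6") (h7 : ¬ PySem.List.pyGet? c 1 = some "7") (h8 : ¬ PySem.List.pyGet? c 1 = some "8") (h9 : ¬ PySem.List.pyGet? c 1 = some "9") (h10 : ¬ PySem.List.pyGet? c 1 = some "1") (h11 : ¬ PySem.List.pyGet? c 1 = some "J") (h : PySem.List.pyGet? c 1 = some "Q") :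
    santiaoStep b c = { b with bQ := b.bQ ++ [c] } := by
  unfold santiaoStep; rw [if_neg h1, if_neg h2, if_neg h3, if_neg h4, if_neg h5, if_neg h6, if_neg h7, if_neg h8, if_neg h9, if_neg h10, if_neg h11, if_pos h]

theorem step_K (b : SBuckets) (c : List String) (h1 : ¬ PySem.List.pyGet? c 1 = some "A") (h2 : ¬ PySem.List.pyGet? c 1 = some "2") (h3 : ¬ PySem.List.pyGet? c 1 = some "3") (h4 : ¬ PySem.List.pyGet? c 1 = some "4") (h5 : ¬ PySem.List.pyGet? c 1 = some "5") (h6 : ¬ PySem.List.pyGet? c 1 = some "6") (h7 : ¬ PySem.List.pyGet? c 1 = some "7") (h8 : ¬ PySem.List.pyGet? c 1 = some "8") (h9 : ¬ PySem.List.pyGet? c 1 = some "9") (h10 : ¬ PySem.List.pyGet? c 1 = some "1") (h11 : ¬ PySem.List.pyGet? c 1 = some "J") (h12 : ¬ PySem.List.pyGet? c 1 = some "Q") :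
    santiaoStep b c = { b with bK := b.bK ++ [c] } := by
  unfold santiaoStep; rw [if_neg h1, if_neg h2, if_neg h3, if_neg h4, if_neg h5, if_neg h6, if_neg h7, if_neg h8, if_neg h9, if_neg h10, if_neg h11, if_neg h12]

set_option maxHeartbeats 1000000 in
theorem loop_eq (l : List (List String)) (b : SBuckets) :
    l.foldl santiaoStep b =
      ⟨b.bA ++ rfilter l 14, b.b2 ++ rfilter l 2, b.b3 ++ rfilter l 3,
       b.b4 ++ rfilter l 4, b.b5 ++ rfilter l 5, b.b6 ++ rfilter l 6,
       b.b7 ++ rfilter l 7, b.b8 ++ rfilter l 8, b.b9 ++ rfilter l 9,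
       b.b10 ++ rfilter l 10, b.bJ ++ rfilter l 11, b.bQ ++ rfilter l 12,
       b.bK ++ rfilter l 13⟩ := by
  induction l generalizing b with
  | nil => simp [rfilter]
  | cons c t ih =>
    rw [List.foldl_cons]
    by_cases h1 : PySem.List.pyGet? c 1 = some "A"
    · rw [step_A b c h1, ih]
      simp only [SBuckets.mk.injEq, rfilter_cons, rank_A c h1]
      simp
    by_cases h2 : PySem.List.pyGet? c 1 = some "2"
    · rw [step_2 b c h1 h2, ih]
      simp only [SBuckets.mk.injEq, rfilter_cons, rank_2 c h2]
      simp
    by_cases h3 : PySem.List.pyGet? c 1 = some "3"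
    · rw [step_3 b c h1 h2 h3, ih]
      simp only [SBuckets.mk.injEq, rfilter_cons, rank_3 c h3]
      simp
    by_cases h4 : PySem.List.pyGet? c 1 = some "4"
    · rw [step_4 b c h1 h2 h3 h4, ih]
      simp only [SBuckets.mk.injEq, rfilter_cons, rank_4 c h4]
      simp
    by_cases h5 : PySem.List.pyGet? c 1 = some "5"
    · rw [step_5 b c h1 h2 h3 h4 h5, ih]
      simp only [SBuckets.mk.injEq, rfilter_cons, rank_5 c h5]
      simp
    by_cases h6 : PySem.List.pyGet? c 1 = some "6"
    · rw [step_6 b c h1 h2 h3 h4 h5 h6, ih]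
      simp only [SBuckets.mk.injEq, rfilter_cons, rank_6 c h6]
      simp
    by_cases h7 : PySem.List.pyGet? c 1 = some "7"
    · rw [step_7 b c h1 h2 h3 h4 h5 h6 h7, ih]
      simp only [SBuckets.mk.injEq, rfilter_cons, rank_7 c h7]
      simp
    by_cases h8 : PySem.List.pyGet? c 1 = some "8"
    · rw [step_8 b c h1 h2 h3 h4 h5 h6 h7 h8, ih]
      simp only [SBuckets.mk.injEq, rfilter_cons, rank_8 c h8]
      simp
    by_cases h9 : PySem.List.pyGet? c 1 = some "9"
    · rw [step_9 b c h1 h2 h3 h4 h5 h6 h7 h8 h9, ih]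
      simp only [SBuckets.mk.injEq, rfilter_cons, rank_9 c h9]
      simp
    by_cases h10 : PySem.List.pyGet? c 1 = some "1"
    · rw [step_10 b c h1 h2 h3 h4 h5 h6 h7 h8 h9 h10, ih]
      simp only [SBuckets.mk.injEq, rfilter_cons, rank_10 c h10]
      simp
    by_cases h11 : PySem.List.pyGet? c 1 = some "J"
    · rw [step_J b c h1 h2 h3 h4 h5 h6 h7 h8 h9 h10 h11, ih]
      simp only [SBuckets.mk.injEq, rfilter_cons, rank_J c h11]
      simp
    by_cases h12 : PySem.List.pyGet? c 1 = some "Q"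
    · rw [step_Q b c h1 h2 h3 h4 h5 h6 h7 h8 h9 h10 h11 h12, ih]
      simp only [SBuckets.mk.injEq, rfilter_cons, rank_Q c h12]
      simp
    rw [step_K b c h1 h2 h3 h4 h5 h6 h7 h8 h9 h10 h11 h12, ih]
    simp only [SBuckets.mk.injEq, rfilter_cons, rank_K c h1 h2 h3 h4 h5 h6 h7 h8 h9 h10 h11 h12]
    simp

theorem appIf_eq (cond : Prop) [Decidable cond] (s : List (List (List String))) (x : List (List String)) :
    appIf cond s x = s ++ (if cond then [x] else []) := by
  unfold appIf; split_ifs <;> simp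

-- ===== B side: the stable descending sort is the concatenation of the rank filters =====

def pvBefore : List String → List String → Bool :=
  fun a b => decide (rankB b < rankB a)

theorem insertBy_append_not_before (c : List String) (xs ys : List (List String))
    (h : ∀ y ∈ xs, pvBefore c y = false) :
    PySem.List.insertBy pvBefore c (xs ++ ys) = xs ++ PySem.List.insertBy pvBefore c ys := by
  induction xs with
  | nil => simp
  | cons x t ih =>
    rw [List.cons_append, PySem.List.insertBy, h x List.mem_cons_self]
    simp only [Bool.false_eq_true, if_false, List.cons_append, List.cons.injEq, true_and]
    exact ih (fun y hy => h y (List.mem_cons_of_mem x hy))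

theorem insertBy_all_before (c : List String) (L : List (List String))
    (h : ∀ y ∈ L, pvBefore c y = true) :
    PySem.List.insertBy pvBefore c L = c :: L := by
  cases L with
  | nil => rfl
  | cons y t => rw [PySem.List.insertBy, h y List.mem_cons_self]; simp

theorem insert_blocks (R : List Int) (hR : R.Pairwise (· > ·)) (l : List (List String))
    (c : List String) (hc : rankB c ∈ R) :
    PySem.List.insertBy pvBefore c (R.flatMap (rfilter l)) =
      R.flatMap (rfilter (l ++ [c])) := by
  induction R with
  | nil => cases hc
  | cons r R' ih =>
    have hRp := (List.pairwise_cons.mp hR).1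
    have hR' := (List.pairwise_cons.mp hR).2
    simp only [List.flatMap_cons]
    by_cases hcr : rankB c = r
    · -- c joins the first block: it walks past that block and lands before the rest
      rw [insertBy_append_not_before c _ _ (by
        intro y hy
        have := mem_rfilter hy
        simp [pvBefore, this, hcr])]
      rw [insertBy_all_before c _ (by
        intro y hy
        rcases List.mem_flatMap.mp hy with ⟨r', hr', hy'⟩
        have hlt : r' < r := hRp r' hr'
        have := mem_rfilter hy'
        simp [pvBefore, this, hcr]; omega)]
      have hrest : R'.flatMap (rfilter (l ++ [c])) = R'.flatMap (rfilter l) := by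
        refine List.flatMap_congr ?_
        intro r' hr'
        rw [rfilter_append_singleton]
        have : ¬ rankB c = r' := by have := hRp r' hr'; omega
        simp [this]
      rw [hrest, rfilter_append_singleton, hcr]
      simp
    · have hc' : rankB c ∈ R' := by
        rcases List.mem_cons.mp hc with h | h
        · exact absurd h hcr
        · exact h
      rw [insertBy_append_not_before c _ _ (by
        intro y hy
        have hy' := mem_rfilter hy
        have : rankB c < r := hRp _ hc'
        simp [pvBefore, hy']; omega)]
      rw [ih hR' hc']
      rw [rfilter_append_singleton]
      simp [hcr]

theorem sorted_eq_blocks (l : List (List String)) :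
    PySem.List.sorted l rankB true = ranksDesc.flatMap (rfilter l) := by
  rw [PySem.List.sorted_rev_eq_foldl_insertBy]
  induction l using List.reverseRecOn with
  | nil => simp [rfilter]
  | append_singleton l c ih =>
    rw [List.foldl_append, List.foldl_cons, List.foldl_nil, ih]
    exact insert_blocks ranksDesc (by decide) l c (rankB_mem_ranksDesc c)

theorem runSplit_run (r : Int) (g rest : List (List String))
    (hg : ∀ x ∈ g, rankB x = r) (hrest : ∀ y ∈ rest, rankB y ≠ r) :
    runSplit r (g ++ rest) = (g, rest) := by
  induction g with
  | nil =>
    cases rest with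
    | nil => rfl
    | cons y t =>
      have := hrest y List.mem_cons_self
      simp [runSplit, this]
  | cons x t ih =>
    have hx := hg x List.mem_cons_self
    rw [List.cons_append]
    unfold runSplit
    simp only [hx, beq_self_eq_true, if_pos]
    rw [ih (fun y hy => hg y (List.mem_cons_of_mem x hy))]

theorem scan_blocks (R : List Int) (hR : R.Pairwise (· > ·)) (G : Int → List (List String))
    (hG : ∀ r ∈ R, ∀ x ∈ G r, rankB x = r) :
    scanRuns (R.flatMap G) =
      R.flatMap (fun r => if (G r).length = 3 then [G r] else []) := by
  induction R with
  | nil => simp [scanRuns.eq_1]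
  | cons r R' ih =>
    have hRp := (List.pairwise_cons.mp hR).1
    have hR' := (List.pairwise_cons.mp hR).2
    have hG' : ∀ r' ∈ R', ∀ x ∈ G r', rankB x = r' :=
      fun r' hr' => hG r' (List.mem_cons_of_mem r hr')
    have hrest : ∀ y ∈ R'.flatMap G, rankB y ≠ r := by
      intro y hy
      rcases List.mem_flatMap.mp hy with ⟨r', hr', hy'⟩
      have := hG' r' hr' y hy'
      have := hRp r' hr'
      omega
    simp only [List.flatMap_cons]
    cases hGr : G r with
    | nil =>
      simp only [List.nil_append, ih hR' hG']
      simp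
    | cons c g =>
      have hcg : ∀ x ∈ c :: g, rankB x = r := by rw [← hGr]; exact hG r List.mem_cons_self
      have hc : rankB c = r := hcg c List.mem_cons_self
      rw [List.cons_append, scanRuns.eq_2, hc]
      rw [runSplit_run r g (R'.flatMap G)
        (fun x hx => hcg x (List.mem_cons_of_mem c hx)) hrest]
      simp only [ih hR' hG']
      have : (c :: g).length = g.length + 1 := by simp
      by_cases h3 : g.length + 1 = 3
      · simp [h3]
      · simp [h3]

-- ===== VERDICT (by name: the statement is the Claim_ definition above) =====
theorem santiao_spec : Claim_equal_santiao := by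
  intro mypai _ _
  show santiao mypai = santiao_alt mypai
  unfold santiao santiao_alt
  rw [loop_eq, sorted_eq_blocks,
    scan_blocks ranksDesc (by decide) (rfilter mypai) (fun r _ x hx => mem_rfilter hx)]
  simp only [appIf_eq, ranksDesc, List.flatMap_cons, List.flatMap_nil, List.nil_append,
    List.append_assoc, List.append_nil]
  rfl
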